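-- pv_equiv track=rewrite | github.com/capsuleismail/CodeWars | replace_common.py | replace_common
-- ===== SOURCE A (Python) =====
-- def replace_common(st, letter):
--     freq = {}
--     for ch in st:
--         if ch.isalpha():
--             ch = ch.lower()  # optional, for case-insensitivity
--             if ch in freq:
--                 freq[ch] += 1
--             else:
--                 freq[ch] = 1
--
--     to_replace = max(freq, key=freq.get)
--
--     return st.replace(to_replace, letter)
-- ===== SOURCE B (Python) =====
-- def replace_common(st, letter):
--     distinct = []
--     for ch in st:
--         if ch.isalpha():
--             c = ch.lower()
--             if c not in distinct:
--                 distinct.append(c)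
--     to_replace = max(distinct, key=lambda c: sum(1 for x in st if x.isalpha() and x.lower() == c))
--     return st.replace(to_replace, letter)
-- ===== Notes on version B (the rewrite author's own statement) =====
-- stated objective: alternative
-- what changed: Replaces the incremental count-dict with a distinct-letters list (first-appearance order) plus a recount scan per candidate inside max(); the counter data structure disappears.
import Mathlib
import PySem

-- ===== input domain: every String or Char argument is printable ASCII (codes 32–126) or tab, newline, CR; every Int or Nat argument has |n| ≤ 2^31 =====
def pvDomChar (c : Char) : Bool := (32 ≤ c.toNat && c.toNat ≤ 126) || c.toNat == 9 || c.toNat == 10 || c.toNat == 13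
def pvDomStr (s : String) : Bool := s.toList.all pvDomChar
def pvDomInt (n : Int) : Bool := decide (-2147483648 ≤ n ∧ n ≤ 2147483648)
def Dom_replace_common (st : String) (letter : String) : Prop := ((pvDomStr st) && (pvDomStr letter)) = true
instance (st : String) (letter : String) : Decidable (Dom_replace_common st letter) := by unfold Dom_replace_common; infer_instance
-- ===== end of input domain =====

-- B replaces A's incremental count-dict with a distinct-letters list in first-appearance
-- order and a recount scan per candidate inside max(); same result, different structure.


-- ===== PORT A =====
def replace_common (st : String) (letter : String) : String :=
  let freq : PySem.Dict Char Int := st.toList.foldl (fun d ch =>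
    if PySem.Chars.isalpha ch then
      let ch := PySem.Chars.lowerChar ch
      if d.contains ch then d.insert ch (d.getD ch 0 + 1) else d.insert ch 1
    else d) PySem.Dict.empty
  match PySem.List.max? freq.keys (fun k => freq.getD k 0) with
  | some c => PySem.Str.replace st (String.ofList [c]) letter
  | none => ""   -- max over an empty dict: ValueError, excluded by Pre_

-- ===== PORT B =====
def replace_common_alt (st : String) (letter : String) : String :=
  let distinct : List Char := st.toList.foldl (fun acc ch =>
    if PySem.Chars.isalpha ch then
      let c := PySem.Chars.lowerChar ch
      if acc.contains c then acc else acc ++ [c]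
    else acc) []
  match PySem.List.max? distinct
      (fun c => (st.toList.countP (fun x => PySem.Chars.isalpha x && PySem.Chars.lowerChar x == c) : Int)) with
  | some c => PySem.Str.replace st (String.ofList [c]) letter
  | none => ""   -- max over an empty list: ValueError, excluded by Pre_

-- ===== PRECONDITION & SPEC =====
-- A (and B) raise ValueError (max of an empty collection) when st has no alphabetic character.
def Pre_replace_common (st : String) (letter : String) : Prop :=
  st.toList.any PySem.Chars.isalpha = true
instance (st : String) (letter : String) : Decidable (Pre_replace_common st letter) := by
  unfold Pre_replace_common; infer_instance
def pvWitness_replace_common : String × String := ("aab", "x")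

def Spec_replace_common (st : String) (letter : String) (out : String) : Prop := out = replace_common_alt st letter
instance (st : String) (letter : String) (out : String) : Decidable (Spec_replace_common st letter out) := by unfold Spec_replace_common; infer_instance

-- ===== CLAIM (what is proved, stated in full; the proofs are below) =====
def Claim_equal_replace_common : Prop := ∀ (st : String) (letter : String), Dom_replace_common st letter → Pre_replace_common st letter → Spec_replace_common st letter (replace_common st letter)

-- ===== LEMMAS AND PROOFS =====

-- a fold with an embedded filter+map equals the fold over the filtered, mapped list
theorem pv_foldl_filter_map {α β γ : Type} (p : α → Bool) (g : α → γ) (f : β → γ → β) :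
    ∀ (xs : List α) (init : β),
      xs.foldl (fun d ch => if p ch then f d (g ch) else d) init
        = ((xs.filter p).map g).foldl f init := by
  intro xs
  induction xs with
  | nil => intro init; rfl
  | cons x t ih =>
    intro init
    by_cases h : p x = true <;> simp [h, ih]

-- A's branchy count update is Dict.modify with default 0
theorem pv_update_eq_modify (d : PySem.Dict Char Int) (x : Char) :
    (if d.contains x then d.insert x (d.getD x 0 + 1) else d.insert x 1)
      = d.modify x 0 (· + 1) := by
  by_cases h : d.contains x = true
  · simp [h, PySem.Dict.modify]
  · have h0 : d.getD x 0 = 0 := by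
      have hn : d.get? x = none :=
        (PySem.Dict.get?_eq_none_iff_contains d x).2 (by simpa using h)
      simp [PySem.Dict.getD, hn]
    simp [h, PySem.Dict.modify, h0]

-- B's distinct-accumulation step is Set.add
theorem pv_step_eq_add :
    (fun (acc : List Char) c => if acc.contains c then acc else acc ++ [c]) = PySem.Set.add := by
  funext s x
  rfl

theorem replace_common_spec : Claim_equal_replace_common := by
  intro st letter _ _
  unfold Spec_replace_common replace_common replace_common_alt
  simp only [pv_update_eq_modify]
  have eA :
      st.toList.foldl
          (fun d ch => if PySem.Chars.isalpha ch then
              PySem.Dict.modify d (PySem.Chars.lowerChar ch) 0 (· + 1) else d)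
          PySem.Dict.empty
        = PySem.Dict.counter
            ((st.toList.filter PySem.Chars.isalpha).map PySem.Chars.lowerChar) := by
    rw [pv_foldl_filter_map PySem.Chars.isalpha PySem.Chars.lowerChar
      (fun d c => PySem.Dict.modify d c 0 (· + 1)) st.toList PySem.Dict.empty,
      PySem.Dict.counter_eq_foldl]
  have eB :
      st.toList.foldl
          (fun acc ch => if PySem.Chars.isalpha ch then
              (if acc.contains (PySem.Chars.lowerChar ch) then acc
               else acc ++ [PySem.Chars.lowerChar ch]) else acc)
          ([] : List Char)
        = PySem.Set.ofList
            ((st.toList.filter PySem.Chars.isalpha).map PySem.Chars.lowerChar) := by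
    rw [pv_foldl_filter_map PySem.Chars.isalpha PySem.Chars.lowerChar
      (fun (acc : List Char) c => if acc.contains c then acc else acc ++ [c])
      st.toList ([] : List Char),
      pv_step_eq_add, PySem.Set.ofList_eq_foldl]
  rw [eA, eB, PySem.Dict.keys_counter]
  have hkey :
      (fun k => (PySem.Dict.counter
            ((st.toList.filter PySem.Chars.isalpha).map PySem.Chars.lowerChar)).getD k 0)
        = (fun c => ((st.toList.countP
            (fun x => PySem.Chars.isalpha x && PySem.Chars.lowerChar x == c)) : Int)) := by
    funext c
    rw [PySem.Dict.getD_counter]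
    congr 1
    simp only [List.count, List.countP_map, List.countP_filter, Function.comp]
    exact List.countP_congr (fun a _ => by
      cases h1 : PySem.Chars.isalpha a <;> simp [h1, Bool.and_comm])
  rw [hkey]
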